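-- pv_equiv track=rewrite | github.com/zeertag/lab2s4 | ACDC.py | ac_coding
-- ===== SOURCE A (Python) =====
-- def ac_coding(ac):
--     def category(val):
--         return 0 if val == 0 else val.bit_length()
--
--     def bits(val):
--         cat = category(val)
--         if cat == 0:
--             return ""
--         if val < 0:
--             val = ((1 << cat) - 1) ^ (abs(val))
--         return bin(val)[2:].zfill(cat)
--
--     result = []
--     run_length = 0
--     for val in ac:
--         val = int(val)
--         if val == 0:
--             run_length += 1
--         else:
--             size = category(val)
--             bits_val = bits(val)
--             while run_length > 15:
--                 result.append((15, 0, ''))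
--                 run_length -= 16
--             result.append((run_length, size, bits_val))
--             run_length = 0
--     if run_length > 0:
--         result.append((0, 0, ''))
--     return result
-- ===== SOURCE B (Python) =====
-- def ac_coding(ac):
--     def category(val):
--         return 0 if val == 0 else val.bit_length()
--
--     def bits(val):
--         cat = category(val)
--         if cat == 0:
--             return ""
--         if val < 0:
--             val = ((1 << cat) - 1) ^ (abs(val))
--         return bin(val)[2:].zfill(cat)
--
--     nz = [(i, int(v)) for i, v in enumerate(ac) if int(v) != 0]
--     result = []
--     prev = -1
--     for i, v in nz:
--         run = i - prev - 1
--         while run > 15: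
--             result.append((15, 0, ''))
--             run -= 16
--         result.append((run, category(v), bits(v)))
--         prev = i
--     if prev < len(ac) - 1:
--         result.append((0, 0, ''))
--     return result
-- ===== Notes on version B (the rewrite author's own statement) =====
-- stated objective: alternative
-- what changed: B first collects the indexed nonzero coefficients in one scan, then derives each zero-run from the gap between consecutive nonzero indices and decides the trailing EOB from the last nonzero index, instead of A's running zero counter.
import Mathlib
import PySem

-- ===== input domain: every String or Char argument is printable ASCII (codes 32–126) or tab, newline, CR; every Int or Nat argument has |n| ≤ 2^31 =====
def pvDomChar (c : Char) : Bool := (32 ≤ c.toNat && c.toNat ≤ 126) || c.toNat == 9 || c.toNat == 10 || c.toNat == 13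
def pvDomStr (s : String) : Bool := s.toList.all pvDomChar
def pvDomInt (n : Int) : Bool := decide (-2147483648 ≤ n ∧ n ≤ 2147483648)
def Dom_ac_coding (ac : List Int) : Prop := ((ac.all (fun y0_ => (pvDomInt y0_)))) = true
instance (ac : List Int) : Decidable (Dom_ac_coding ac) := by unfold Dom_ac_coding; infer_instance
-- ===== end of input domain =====

-- B replaces A's running zero counter by an index-gap pass over the collected nonzero
-- coefficients (alternative decomposition, same cost); equivalence is proved on all inputs.


-- ===== PORT A =====
-- shared helpers (both Pythons define identical `category`/`bits`; ported once)
-- Python val.bit_length(): number of bits of |val|; Nat.size computes exactly that.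
def pvCategory (v : Int) : Int := if v = 0 then 0 else (Nat.size v.natAbs : Int)

-- bin(n)[2:] for n > 0: binary digits, most significant first ([] for n = 0).
def pvBinDigits (n : Nat) : List Char :=
  if h : n = 0 then [] else pvBinDigits (n / 2) ++ [if n % 2 = 1 then '1' else '0']
  decreasing_by exact Nat.div_lt_self (Nat.pos_of_ne_zero h) one_lt_two

-- bin(n)[2:] including bin(0)[2:] = "0"
def pvBin (n : Nat) : List Char := if n = 0 then ['0'] else pvBinDigits n

-- str.zfill(w): pad with '0' on the left to width w
def pvZfill (s : List Char) (w : Nat) : List Char := List.replicate (w - s.length) '0' ++ s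

-- Python `bits`: for val < 0, val = ((1 << cat) - 1) ^ abs(val), then bin(val)[2:].zfill(cat)
def pvBits (v : Int) : String :=
  let cat := pvCategory v
  if cat = 0 then ""
  else
    let n : Nat := if v < 0 then (2 ^ cat.toNat - 1) ^^^ v.natAbs else v.natAbs
    String.ofList (pvZfill (pvBin n) cat.toNat)

-- the `while run_length > 15` loop, shared verbatim by both Pythons
def pvZrl (acc : List (Int × Int × String)) (run : Int) : List (Int × Int × String) × Int :=
  if run > 15 then pvZrl (acc ++ [(15, 0, "")]) (run - 16) else (acc, run)
  termination_by run.toNat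
  decreasing_by omega

-- body of A's `for val in ac` loop over state (result, run_length); int(val) = val on ints
def pvStepA (st : List (Int × Int × String) × Int) (val : Int) :
    List (Int × Int × String) × Int :=
  if val = 0 then (st.1, st.2 + 1)
  else
    let size := pvCategory val
    let bits_val := pvBits val
    let p := pvZrl st.1 st.2
    (p.1 ++ [(p.2, size, bits_val)], 0)

def ac_coding (ac : List Int) : List (Int × Int × String) :=
  let p := ac.foldl pvStepA ([], 0)
  if p.2 > 0 then p.1 ++ [(0, 0, "")] else p.1

-- ===== PORT B =====
-- [(i, int(v)) for i, v in enumerate(ac) if int(v) != 0], enumerating from index i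
def pvNz (i : Int) (l : List Int) : List (Int × Int) :=
  match l with
  | [] => []
  | v :: t => if v ≠ 0 then (i, v) :: pvNz (i + 1) t else pvNz (i + 1) t

-- body of B's `for i, v in nz` loop over state (result, prev)
def pvStepB (st : List (Int × Int × String) × Int) (p : Int × Int) :
    List (Int × Int × String) × Int :=
  let run := p.1 - st.2 - 1
  let q := pvZrl st.1 run
  (q.1 ++ [(q.2, pvCategory p.2, pvBits p.2)], p.1)

def ac_coding_alt (ac : List Int) : List (Int × Int × String) :=
  let p := (pvNz 0 ac).foldl pvStepB ([], -1)
  if p.2 < (ac.length : Int) - 1 then p.1 ++ [(0, 0, "")] else p.1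

-- ===== PRECONDITION & SPEC =====
def Spec_ac_coding (ac : List Int) (out : List (Int × Int × String)) : Prop := out = ac_coding_alt ac
instance (ac : List Int) (out : List (Int × Int × String)) : Decidable (Spec_ac_coding ac out) := by unfold Spec_ac_coding; infer_instance

-- ===== CLAIM (what is proved, stated in full; the proofs are below) =====
def Claim_equal_ac_coding : Prop := ∀ (ac : List Int), Dom_ac_coding ac → Spec_ac_coding ac (ac_coding ac)

-- ===== LEMMAS AND PROOFS =====
-- Invariant: B's fold over the nonzeros of l (indexed from i), started at prev = i - r - 1,
-- yields A's accumulated result and prev such that A's final run_length = i + |l| - prev - 1.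
theorem pv_main (l : List Int) (acc : List (Int × Int × String)) (r i : Int) :
    (pvNz i l).foldl pvStepB (acc, i - r - 1) =
      ((l.foldl pvStepA (acc, r)).1,
        i + (l.length : Int) - (l.foldl pvStepA (acc, r)).2 - 1) := by
  induction l generalizing acc r i with
  | nil => simp [pvNz]
  | cons v t ih =>
    by_cases hv : v = 0
    · subst hv
      have h1 : i - r - 1 = (i + 1) - (r + 1) - 1 := by omega
      simp only [pvNz, List.foldl_cons, pvStepA, ne_eq, not_true_eq_false, if_false, h1]
      rw [ih]
      simp
      omega
    · have hrun : i - (i - r - 1) - 1 = r := by omega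
      simp only [pvNz, ne_eq, hv, not_false_eq_true, if_true, List.foldl_cons, pvStepA, pvStepB, hrun]
      have h2 : i = (i + 1) - (0 : Int) - 1 := by omega
      rw [show ((pvZrl acc r).1 ++ [((pvZrl acc r).2, pvCategory v, pvBits v)], i) =
          ((pvZrl acc r).1 ++ [((pvZrl acc r).2, pvCategory v, pvBits v)],
            (i + 1) - (0 : Int) - 1) from by rw [← h2]]
      rw [ih]
      simp
      omega

-- ===== VERDICT (by name: the statement is the Claim_ definition above) =====
theorem ac_coding_spec : Claim_equal_ac_coding := by
  intro ac _
  unfold Spec_ac_coding ac_coding ac_coding_alt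
  have h := pv_main ac [] 0 0
  rw [show (0 : Int) - 0 - 1 = -1 from rfl] at h
  rw [h]
  by_cases hr : (ac.foldl pvStepA ([], 0)).2 > 0
  · rw [if_pos hr, if_pos (by omega)]
  · rw [if_neg hr, if_neg (by omega)]
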